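-- pv_equiv track=rewrite | github.com/jodyguan-ship-it/piano-app | detect_notes.py | calculate_harmony
-- ===== SOURCE A (Python) =====
-- def calculate_harmony(indices):
--     """Analyzes the relationship between all detected notes for 'sweetness'."""
--     if len(indices) < 2: return 100
--
--     indices.sort()
--     crunch = 0
--     for i in range(len(indices)):
--         for j in range(i + 1, len(indices)):
--             dist = abs(indices[i] - indices[j]) % 12
--             if dist == 1 or dist == 11: crunch += 55  # Clashing half-steps
--             elif dist == 6: crunch += 40             # The 'Tritone'
--             elif dist in [3, 4, 7]: crunch -= 30      # Harmonious intervals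
--
--     final_score = 100 - max(0, min(100, crunch + 20))
--     return final_score
-- ===== SOURCE B (Python) =====
-- # Residue-bucket sweep: one pass over the sorted notes keeping 12 counts
-- # (one per pitch class), so each note combines with 12 buckets instead of
-- # with every earlier note. (Return-value equivalence: A sorts its argument
-- # in place, B does not mutate it.)
-- SCORE = (0, 55, 0, -30, -30, 0, 40, -30, 0, 0, 0, 55)
--
-- def calculate_harmony(indices):
--     """Analyzes the relationship between all detected notes for 'sweetness'."""
--     if len(indices) < 2: return 100
--     counts = [0] * 12
--     crunch = 0
--     for x in sorted(indices):
--         r = x % 12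
--         for q in range(12):
--             crunch += counts[q] * SCORE[(r - q) % 12]
--         counts[r] += 1
--     final_score = 100 - max(0, min(100, crunch + 20))
--     return final_score
-- ===== Notes on version B (the rewrite author's own statement) =====
-- stated objective: faster
-- what changed: Replaces the O(n^2) all-pairs double loop with a single pass over the sorted list that keeps 12 pitch-class counts and combines each note with the 12 residue buckets of earlier notes.
import Mathlib
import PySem

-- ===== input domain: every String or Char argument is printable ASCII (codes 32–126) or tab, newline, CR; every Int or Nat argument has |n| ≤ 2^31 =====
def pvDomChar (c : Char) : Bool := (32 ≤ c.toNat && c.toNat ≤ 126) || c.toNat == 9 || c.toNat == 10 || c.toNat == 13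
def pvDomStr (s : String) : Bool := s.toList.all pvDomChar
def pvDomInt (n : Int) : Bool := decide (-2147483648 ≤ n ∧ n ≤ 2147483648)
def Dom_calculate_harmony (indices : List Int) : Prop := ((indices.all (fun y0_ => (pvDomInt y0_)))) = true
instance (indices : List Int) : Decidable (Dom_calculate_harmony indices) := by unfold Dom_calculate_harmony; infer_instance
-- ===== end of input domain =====

-- B replaces A's all-pairs double loop by one pass over the sorted list with 12
-- pitch-class counters. Equivalence is about the RETURN value only: A sorts its
-- argument in place, B does not mutate it.

-- ===== PORT A =====
def calculate_harmony (indices : List Int) : Int :=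
  if indices.length < 2 then 100
  else
    let s := PySem.List.sorted indices id
    let crunch : Int :=
      (PySem.List.pyRange 0 (s.length : Int) 1).foldl
        (fun crunch i =>
          (PySem.List.pyRange (i + 1) (s.length : Int) 1).foldl
            (fun crunch j =>
              let dist := PySem.Int.mod |PySem.List.pyGetD s i 0 - PySem.List.pyGetD s j 0| 12
              if dist = 1 ∨ dist = 11 then crunch + 55
              else if dist = 6 then crunch + 40
              else if [3, 4, 7].contains dist then crunch - 30
              else crunch)
            crunch)
        0
    100 - max 0 (min 100 (crunch + 20))

-- ===== PORT B =====
def pyScoreTable : List Int := [0, 55, 0, -30, -30, 0, 40, -30, 0, 0, 0, 55]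

def calculate_harmony_alt (indices : List Int) : Int :=
  if indices.length < 2 then 100
  else
    let st :=
      (PySem.List.sorted indices id).foldl
        (fun (st : Int × List Int) x =>
          let r := PySem.Int.mod x 12
          let crunch :=
            (PySem.List.pyRange 0 12 1).foldl
              (fun crunch q =>
                crunch + PySem.List.pyGetD st.2 q 0 *
                  PySem.List.pyGetD pyScoreTable (PySem.Int.mod (r - q) 12) 0)
              st.1
          (crunch, PySem.List.pySetD st.2 r (PySem.List.pyGetD st.2 r 0 + 1)))
        ((0 : Int), List.replicate 12 (0 : Int))
    100 - max 0 (min 100 (st.1 + 20))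

-- ===== PRECONDITION & SPEC =====
def Spec_calculate_harmony (indices : List Int) (out : Int) : Prop := out = calculate_harmony_alt indices
instance (indices : List Int) (out : Int) : Decidable (Spec_calculate_harmony indices out) := by unfold Spec_calculate_harmony; infer_instance

-- ===== CLAIM (what is proved, stated in full; the proofs are below) =====
def Claim_equal_calculate_harmony : Prop := ∀ (indices : List Int), Dom_calculate_harmony indices → Spec_calculate_harmony indices (calculate_harmony indices)

-- ===== LEMMAS AND PROOFS =====

-- the interval score of A's branch chain, as a function of dist
def hscore (d : Int) : Int :=
  if d = 1 ∨ d = 11 then 55 else if d = 6 then 40 else if [3, 4, 7].contains d then -30 else 0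

-- pair contribution, earlier element x, later element y
def gterm (x y : Int) : Int := hscore (PySem.Int.mod (y - x) 12)
-- A's pair contribution (with abs, i before j)
def aterm (x y : Int) : Int := hscore (PySem.Int.mod |x - y| 12)

def pairSum : List Int → Int
  | [] => 0
  | x :: xs => (xs.map (gterm x)).sum + pairSum xs

def pairSumA : List Int → Int
  | [] => 0
  | x :: xs => (xs.map (aterm x)).sum + pairSumA xs

def countsOf (seen : List Int) : List Int :=
  (PySem.List.pyRange 0 12 1).map
    (fun q => ((seen.countP (fun x => PySem.Int.mod x 12 == q)) : Int))

theorem branch_eq (c d : Int) :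
    (if d = 1 ∨ d = 11 then c + 55
     else if d = 6 then c + 40
     else if [3, 4, 7].contains d then c - 30
     else c) = c + hscore d := by
  unfold hscore; split_ifs <;> ring

theorem ds_eq_pairSumA (s : List Int) :
    ((List.range s.length).map
      (fun k => ((s.drop (k + 1)).map (aterm (s.getD k 0))).sum)).sum = pairSumA s := by
  induction s with
  | nil => simp [pairSumA]
  | cons x xs ih =>
    have h1 : (List.map
        ((fun k => ((List.drop (k + 1) (x :: xs)).map (aterm ((x :: xs).getD k 0))).sum) ∘ Nat.succ)
        (List.range xs.length)) =
        (List.map (fun k => ((List.drop (k + 1) xs).map (aterm (xs.getD k 0))).sum)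
          (List.range xs.length)) := by
      refine List.map_congr_left ?_
      intro k _
      simp only [Function.comp_apply, Nat.succ_eq_add_one, List.getD_cons_succ,
        List.drop_succ_cons]
    rw [List.length_cons, List.range_succ_eq_map, List.map_cons, List.sum_cons, List.map_map,
      h1, ih, pairSumA]
    simp only [List.getD_cons_zero, List.drop_succ_cons, List.drop_zero]

theorem pairSumA_eq_pairSum (s : List Int) (h : s.Pairwise (· ≤ ·)) : pairSumA s = pairSum s := by
  induction s with
  | nil => rfl
  | cons x xs ih =>
    rw [pairSumA, pairSum]
    rcases List.pairwise_cons.mp h with ⟨hx, hxs⟩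
    rw [ih hxs]
    congr 1
    refine congrArg List.sum (List.map_congr_left ?_)
    intro z hz
    unfold aterm gterm
    rw [abs_of_nonpos (by have := hx z hz; omega)]
    ring_nf

-- A's double index loop computes pairSumA of the list
theorem aLoop (s : List Int) :
    (PySem.List.pyRange 0 (s.length : Int) 1).foldl
      (fun crunch i =>
        (PySem.List.pyRange (i + 1) (s.length : Int) 1).foldl
          (fun crunch j =>
            let dist := PySem.Int.mod |PySem.List.pyGetD s i 0 - PySem.List.pyGetD s j 0| 12
            if dist = 1 ∨ dist = 11 then crunch + 55
            else if dist = 6 then crunch + 40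
            else if [3, 4, 7].contains dist then crunch - 30
            else crunch)
          crunch)
      0 = pairSumA s := by
  have hcong : ∀ (acc : Int), ∀ i ∈ PySem.List.pyRange 0 (s.length : Int) 1,
      (PySem.List.pyRange (i + 1) (s.length : Int) 1).foldl
        (fun crunch j =>
          let dist := PySem.Int.mod |PySem.List.pyGetD s i 0 - PySem.List.pyGetD s j 0| 12
          if dist = 1 ∨ dist = 11 then crunch + 55
          else if dist = 6 then crunch + 40
          else if [3, 4, 7].contains dist then crunch - 30
          else crunch)
        acc =
      acc + ((s.drop (i + 1).toNat).map (aterm (PySem.List.pyGetD s i 0))).sum := by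
    intro acc i hi
    have hstep : (fun (crunch : Int) (j : Int) =>
        let dist := PySem.Int.mod |PySem.List.pyGetD s i 0 - PySem.List.pyGetD s j 0| 12
        if dist = 1 ∨ dist = 11 then crunch + 55
        else if dist = 6 then crunch + 40
        else if [3, 4, 7].contains dist then crunch - 30
        else crunch) =
        (fun crunch j => crunch + aterm (PySem.List.pyGetD s i 0) (PySem.List.pyGetD s j 0)) := by
      funext c j
      exact branch_eq c _
    rw [hstep, PySem.List.foldl_add]
    congr 1
    have : (fun j => aterm (PySem.List.pyGetD s i 0) (PySem.List.pyGetD s j 0)) =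
        (aterm (PySem.List.pyGetD s i 0)) ∘ (fun j => PySem.List.pyGetD s j 0) := rfl
    rw [this, ← List.map_map, PySem.List.map_pyGetD_pyRange' s 0
      (by rcases (PySem.List.mem_pyRange_one).mp hi with ⟨h1, _⟩; omega)]
  rw [PySem.List.foldl_congr_mem _ _ _ _ hcong, PySem.List.foldl_add,
    PySem.List.pyRange_zero_natCast, List.map_map, zero_add, ← ds_eq_pairSumA s]
  refine congrArg List.sum (List.map_congr_left ?_)
  intro k _
  simp only [Function.comp_apply, PySem.List.pyGetD_natCast]
  have h2 : ((k : Int) + 1).toNat = k + 1 := by omega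
  rw [h2]

-- the score table agrees with hscore on 0..11
theorem table_eq (d : Int) (h1 : 0 ≤ d) (h2 : d < 12) :
    PySem.List.pyGetD pyScoreTable d 0 = hscore d := by
  interval_cases d <;> rfl

theorem modmod (x y : Int) :
    PySem.Int.mod (PySem.Int.mod y 12 - PySem.Int.mod x 12) 12 = PySem.Int.mod (y - x) 12 := by
  rw [PySem.Int.mod_eq_emod_of_pos (by norm_num), PySem.Int.mod_eq_emod_of_pos (by norm_num),
    PySem.Int.mod_eq_emod_of_pos (by norm_num), PySem.Int.mod_eq_emod_of_pos (by norm_num)]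
  exact (Int.sub_emod y x 12).symm

theorem sum_indicator (L : List Int) (a : Int) (w : Int → Int) (hn : L.Nodup) (ha : a ∈ L) :
    (L.map (fun q => (if a == q then (1 : Int) else 0) * w q)).sum = w a := by
  induction L with
  | nil => cases ha
  | cons b t ih =>
    rcases List.nodup_cons.mp hn with ⟨hb, ht⟩
    rcases List.mem_cons.mp ha with h | h
    · subst h
      have hz : ∀ q ∈ t, (if a == q then (1 : Int) else 0) * w q = (fun _ => (0 : Int)) q := by
        intro q hq
        have : a ≠ q := fun e => hb (e ▸ hq)
        simp [this]
      rw [List.map_cons, List.sum_cons, List.map_congr_left hz]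
      simp
    · have hab : a ≠ b := fun e => (e ▸ hb) h
      rw [List.map_cons, List.sum_cons, ih ht h]
      simp [hab]

theorem counts_sum_aux (seen : List Int) (w : Int → Int) :
    ((PySem.List.pyRange 0 12 1).map
      (fun q => ((seen.countP (fun x => PySem.Int.mod x 12 == q)) : Int) * w q)).sum =
    (seen.map (fun x => w (PySem.Int.mod x 12))).sum := by
  induction seen with
  | nil => simp
  | cons x t ih =>
    have hsplit : ∀ q : Int,
        ((List.countP (fun z => PySem.Int.mod z 12 == q) (x :: t) : Nat) : Int) * w q =
        ((List.countP (fun z => PySem.Int.mod z 12 == q) t : Nat) : Int) * w q +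
          (if PySem.Int.mod x 12 == q then (1 : Int) else 0) * w q := by
      intro q
      rw [List.countP_cons]
      push_cast
      split_ifs <;> ring
    rw [List.map_congr_left (fun q _ => hsplit q), PySem.List.sum_map_add_int, ih,
      sum_indicator _ _ _ (PySem.List.nodup_pyRange_one 0 12)
        ((PySem.List.mem_pyRange_one).mpr
          ⟨PySem.Int.mod_nonneg x (by norm_num), PySem.Int.mod_lt x (by norm_num)⟩)]
    simp [List.map_cons]
    ring

theorem counts_sum (seen : List Int) (w : Int → Int) :
    ((PySem.List.pyRange 0 12 1).map
      (fun q => PySem.List.pyGetD (countsOf seen) q 0 * w q)).sum =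
    (seen.map (fun x => w (PySem.Int.mod x 12))).sum := by
  have hget : ∀ q ∈ PySem.List.pyRange 0 12 1,
      PySem.List.pyGetD (countsOf seen) q 0 * w q =
      ((seen.countP (fun x => PySem.Int.mod x 12 == q)) : Int) * w q := by
    intro q hq
    rcases (PySem.List.mem_pyRange_one).mp hq with ⟨h1, h2⟩
    rw [countsOf, PySem.List.pyGetD_map_pyRange_of_nonneg _ 12 q 0 h1 h2]
  rw [List.map_congr_left hget, counts_sum_aux]

theorem pyGetD_ext (l1 l2 : List Int) (hl : l1.length = l2.length)
    (h : ∀ k : Nat, k < l1.length → PySem.List.pyGetD l1 (k : Int) 0 = PySem.List.pyGetD l2 (k : Int) 0) :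
    l1 = l2 := by
  refine List.ext_getElem hl ?_
  intro k hk1 hk2
  have := h k hk1
  rwa [PySem.List.pyGetD_natCast, PySem.List.pyGetD_natCast,
    List.getD_eq_getElem _ _ hk1, List.getD_eq_getElem _ _ hk2] at this

theorem length_countsOf (seen : List Int) : (countsOf seen).length = 12 := by
  simp [countsOf, PySem.List.length_pyRange_one]

theorem counts_update (seen : List Int) (y : Int) :
    PySem.List.pySetD (countsOf seen) (PySem.Int.mod y 12)
      (PySem.List.pyGetD (countsOf seen) (PySem.Int.mod y 12) 0 + 1) = countsOf (seen ++ [y]) := by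
  have hr0 : 0 ≤ PySem.Int.mod y 12 := PySem.Int.mod_nonneg y (by norm_num)
  have hr12 : PySem.Int.mod y 12 < 12 := PySem.Int.mod_lt y (by norm_num)
  have hrn : PySem.Int.mod y 12 = (((PySem.Int.mod y 12).toNat : Nat) : Int) := by omega
  refine pyGetD_ext _ _ (by rw [PySem.List.length_pySetD, length_countsOf, length_countsOf]) ?_
  intro k hk
  rw [PySem.List.length_pySetD, length_countsOf] at hk
  have hgetk : ∀ (s' : List Int) (m : Nat), m < 12 →
      PySem.List.pyGetD (countsOf s') (m : Int) 0 =
      ((s'.countP (fun x => PySem.Int.mod x 12 == (m : Int))) : Int) := by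
    intro s' m hm
    rw [countsOf, PySem.List.pyGetD_map_pyRange_of_nonneg _ 12 _ 0 (by omega) (by exact_mod_cast hm)]
  rw [hrn, PySem.List.pyGetD_pySetD_natCast _ _ _ _ _ (by rw [length_countsOf]; omega)]
  rw [hgetk (seen ++ [y]) k hk, List.countP_append, List.countP_cons, List.countP_nil,
    hgetk seen k hk]
  by_cases hkr : k = (PySem.Int.mod y 12).toNat
  · subst hkr
    rw [if_pos rfl, hgetk _ _ (by omega)]
    have hby : (PySem.Int.mod y 12 == (((PySem.Int.mod y 12).toNat : Nat) : Int)) = true := by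
      rw [beq_iff_eq]; omega
    rw [hby, if_pos rfl]
    push_cast
    ring
  · rw [if_neg hkr]
    have hby : (PySem.Int.mod y 12 == ((k : Nat) : Int)) = false := by
      rw [beq_eq_false_iff_ne]; omega
    rw [hby]
    simp

theorem pairSum_append (l : List Int) (y : Int) :
    pairSum (l ++ [y]) = pairSum l + (l.map (fun x => gterm x y)).sum := by
  induction l with
  | nil => simp [pairSum]
  | cons x t ih =>
    simp only [List.cons_append, pairSum, ih, List.map_append, List.sum_append, List.map_cons,
      List.sum_cons, List.sum_nil, List.map_nil]
    ring

theorem bLoop (rest seen : List Int) :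
    rest.foldl
      (fun (st : Int × List Int) x =>
        let r := PySem.Int.mod x 12
        let crunch :=
          (PySem.List.pyRange 0 12 1).foldl
            (fun crunch q =>
              crunch + PySem.List.pyGetD st.2 q 0 *
                PySem.List.pyGetD pyScoreTable (PySem.Int.mod (r - q) 12) 0)
            st.1
        (crunch, PySem.List.pySetD st.2 r (PySem.List.pyGetD st.2 r 0 + 1)))
      (pairSum seen, countsOf seen) =
    (pairSum (seen ++ rest), countsOf (seen ++ rest)) := by
  induction rest generalizing seen with
  | nil => simp
  | cons y t ih =>
    rw [List.foldl_cons]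
    have hstep :
        (let r := PySem.Int.mod y 12
         let crunch :=
           (PySem.List.pyRange 0 12 1).foldl
             (fun crunch q =>
               crunch + PySem.List.pyGetD (pairSum seen, countsOf seen).2 q 0 *
                 PySem.List.pyGetD pyScoreTable (PySem.Int.mod (r - q) 12) 0)
             (pairSum seen, countsOf seen).1
         ((crunch, PySem.List.pySetD (pairSum seen, countsOf seen).2 r
            (PySem.List.pyGetD (pairSum seen, countsOf seen).2 r 0 + 1)) : Int × List Int)) =
        (pairSum (seen ++ [y]), countsOf (seen ++ [y])) := by
      show ((PySem.List.pyRange 0 12 1).foldl _ (pairSum seen),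
        PySem.List.pySetD (countsOf seen) _ _) = _
      rw [counts_update]
      have hfn : (fun (crunch : Int) (q : Int) =>
          crunch + PySem.List.pyGetD (countsOf seen) q 0 *
            PySem.List.pyGetD pyScoreTable (PySem.Int.mod (PySem.Int.mod y 12 - q) 12) 0) =
          (fun crunch q => crunch + PySem.List.pyGetD (countsOf seen) q 0 *
            hscore (PySem.Int.mod (PySem.Int.mod y 12 - q) 12)) := by
        funext c q
        rw [table_eq _ (PySem.Int.mod_nonneg _ (by norm_num)) (PySem.Int.mod_lt _ (by norm_num))]
      rw [hfn, PySem.List.foldl_add,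
        counts_sum seen (fun q => hscore (PySem.Int.mod (PySem.Int.mod y 12 - q) 12))]
      rw [pairSum_append]
      have smap : (seen.map
          (fun x => hscore (PySem.Int.mod (PySem.Int.mod y 12 - PySem.Int.mod x 12) 12))) =
          seen.map (fun x => gterm x y) :=
        List.map_congr_left (fun x _ => by rw [gterm, modmod])
      rw [smap]
    rw [hstep, ih, List.append_assoc]
    rfl

-- ===== VERDICT (by name: the statement is the Claim_ definition above) =====
theorem calculate_harmony_spec : Claim_equal_calculate_harmony := by
  intro indices _
  unfold Spec_calculate_harmony calculate_harmony calculate_harmony_alt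
  by_cases hlen : indices.length < 2
  · simp [hlen]
  · simp only [hlen, if_false]
    have hinit : ((0 : Int), List.replicate 12 (0 : Int)) =
        (pairSum [], countsOf []) := by decide
    rw [hinit, bLoop (PySem.List.sorted indices id) []]
    simp only [List.nil_append]
    rw [aLoop, pairSumA_eq_pairSum]
    have := PySem.List.sorted_pairwise indices id
    simpa using this
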